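-- pv_equiv track=rewrite | github.com/Ciro-Taranto/AoC_2025 | day12/p1.py | get_all_shape_variations
-- ===== SOURCE A (Python) =====
-- Shape = set[tuple[int, int]]
--
-- def rotate(shape: Shape) -> Shape:
--     rotated = {(-j, i) for i, j in shape}
--     return normalize(rotated)
--
-- def normalize(shape: Shape) -> Shape:
--     min_x = min(i for i, _ in shape)
--     min_y = min(i for _, i in shape)
--     return {(i - min_x, j - min_y) for i, j in shape}
--
-- def flip_h(shape: Shape) -> Shape:
--     flipped = {(-x, y) for x, y in shape}
--     return normalize(flipped)
--
-- def flip_v(shape: Shape) -> Shape: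
--     flipped = {(x, -y) for x, y in shape}
--     return normalize(flipped)
--
-- def get_all_shape_variations(shape: Shape) -> list[Shape]:
--     curr = shape
--     variations = []
--     for _ in range(4):
--         curr = rotate(curr)
--         if curr not in variations:
--             variations.append(curr)
--     curr = flip_h(shape)
--     for _ in range(4):
--         curr = rotate(curr)
--         if curr not in variations:
--             variations.append(curr)
--     curr = flip_v(shape)
--     for _ in range(4):
--         curr = rotate(curr)
--         if curr not in variations:
--             variations.append(curr)
--     return variations
-- ===== SOURCE B (Python) =====
-- # B: build all 12 candidate shapes up front with direct (closed-form) rotations,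
-- # then dedup in a single pass -- instead of A's three cumulative rotate loops
-- # with interleaved membership tests.
--
-- Shape = set[tuple[int, int]]
--
--
-- def normalize(shape: Shape) -> Shape:
--     min_x = min(i for i, _ in shape)
--     min_y = min(i for _, i in shape)
--     return {(i - min_x, j - min_y) for i, j in shape}
--
--
-- def flip_h(shape: Shape) -> Shape:
--     return normalize({(-x, y) for x, y in shape})
--
--
-- def flip_v(shape: Shape) -> Shape:
--     return normalize({(x, -y) for x, y in shape})
--
--
-- def _direct_rotations(seed: Shape) -> list[Shape]:
--     # the four rotations of `seed`, each produced by one closed-form transform,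
--     # ordered as 90, 180, 270, 0 degrees
--     return [
--         normalize({(-j, i) for i, j in seed}),
--         normalize({(-i, -j) for i, j in seed}),
--         normalize({(j, -i) for i, j in seed}),
--         normalize(seed),
--     ]
--
--
-- def get_all_shape_variations(shape: Shape) -> list[Shape]:
--     candidates = (
--         _direct_rotations(shape)
--         + _direct_rotations(flip_h(shape))
--         + _direct_rotations(flip_v(shape))
--     )
--     variations: list[Shape] = []
--     for cand in candidates:
--         if cand not in variations:
--             variations.append(cand)
--     return variations
-- ===== Notes on version B (the rewrite author's own statement) =====
-- stated objective: simpler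
-- what changed: B computes each of the 12 candidate shapes directly with one closed-form transform (90/180/270/0-degree rotations of each of the three seeds) and deduplicates in a single flat pass, instead of A's three cumulative rotate-and-test loops that thread the rotated shape through interleaved membership checks.
import Mathlib
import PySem

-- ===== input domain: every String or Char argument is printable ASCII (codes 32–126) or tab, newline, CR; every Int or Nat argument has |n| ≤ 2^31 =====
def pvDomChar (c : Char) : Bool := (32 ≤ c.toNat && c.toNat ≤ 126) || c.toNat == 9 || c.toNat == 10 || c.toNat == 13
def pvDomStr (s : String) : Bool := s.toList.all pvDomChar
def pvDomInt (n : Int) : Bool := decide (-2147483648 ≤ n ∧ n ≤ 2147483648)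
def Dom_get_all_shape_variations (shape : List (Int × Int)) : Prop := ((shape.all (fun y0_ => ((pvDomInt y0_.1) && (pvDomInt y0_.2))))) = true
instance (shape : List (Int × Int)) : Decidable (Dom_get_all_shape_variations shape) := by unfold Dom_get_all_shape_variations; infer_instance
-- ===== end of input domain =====

-- B replaces A's three cumulative rotate-and-test loops by building the 12 candidate
-- shapes directly with closed-form transforms and deduplicating in one flat pass (objective: simpler).

-- ===== PORT A =====
-- min(i for i, _ in shape): ValueError on empty — Pre_ excludes []; the .getD 0 default is never reached under Pre_.
def pvMinFst (z : List (Int × Int)) : Int :=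
  (PySem.List.min? (z.map Prod.fst) (fun x => x)).getD 0
def pvMinSnd (z : List (Int × Int)) : Int :=
  (PySem.List.min? (z.map Prod.snd) (fun x => x)).getD 0
def pvNormalize (z : List (Int × Int)) : List (Int × Int) :=
  PySem.Set.ofList (z.map (fun p => (p.1 - pvMinFst z, p.2 - pvMinSnd z)))
def pvRotate (s : List (Int × Int)) : List (Int × Int) :=
  pvNormalize (PySem.Set.ofList (s.map (fun p => (-p.2, p.1))))
def pvFlipH (s : List (Int × Int)) : List (Int × Int) :=
  pvNormalize (PySem.Set.ofList (s.map (fun p => (-p.1, p.2))))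
def pvFlipV (s : List (Int × Int)) : List (Int × Int) :=
  pvNormalize (PySem.Set.ofList (s.map (fun p => (p.1, -p.2))))
-- 'curr not in variations': list membership, where Python's == on two sets is set equality
def pvContains (vars : List (List (Int × Int))) (c : List (Int × Int)) : Bool :=
  vars.any (fun v => PySem.Set.equal v c)
-- one 'for _ in range(4): curr = rotate(curr); if curr not in variations: …' block of A
def pvSpinBlock (st : List (Int × Int) × List (List (Int × Int))) :
    List (Int × Int) × List (List (Int × Int)) :=
  (List.range 4).foldl
    (fun st _ =>
      let c := pvRotate st.1
      (c, if pvContains st.2 c then st.2 else st.2 ++ [c]))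
    st

def get_all_shape_variations (shape : List (Int × Int)) : List (List (Int × Int)) :=
  let st1 := pvSpinBlock (shape, [])
  let st2 := pvSpinBlock (pvFlipH shape, st1.2)
  let st3 := pvSpinBlock (pvFlipV shape, st2.2)
  st3.2

-- ===== PORT B =====
-- the four rotations of `seed`, each by one closed-form transform, ordered 90/180/270/0 degrees
def pvDirectRotations (seed : List (Int × Int)) : List (List (Int × Int)) :=
  [ pvNormalize (PySem.Set.ofList (seed.map (fun p => (-p.2, p.1)))),
    pvNormalize (PySem.Set.ofList (seed.map (fun p => (-p.1, -p.2)))),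
    pvNormalize (PySem.Set.ofList (seed.map (fun p => (p.2, -p.1)))),
    pvNormalize seed ]

def get_all_shape_variations_alt (shape : List (Int × Int)) : List (List (Int × Int)) :=
  let candidates := pvDirectRotations shape ++ pvDirectRotations (pvFlipH shape)
      ++ pvDirectRotations (pvFlipV shape)
  candidates.foldl (fun vars c => if pvContains vars c then vars else vars ++ [c]) []

-- ===== PRECONDITION & SPEC =====
-- Pre_ excludes only the empty shape, on which A's min() raises ValueError (B raises there too).
def Pre_get_all_shape_variations (shape : List (Int × Int)) : Prop := shape ≠ []
instance (shape : List (Int × Int)) : Decidable (Pre_get_all_shape_variations shape) := by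
  unfold Pre_get_all_shape_variations; infer_instance
def pvWitness_get_all_shape_variations : (List (Int × Int)) := [(0, 0), (2, 1)]

def Spec_get_all_shape_variations (shape : List (Int × Int)) (out : List (List (Int × Int))) : Prop := out = get_all_shape_variations_alt shape
instance (shape : List (Int × Int)) (out : List (List (Int × Int))) : Decidable (Spec_get_all_shape_variations shape out) := by unfold Spec_get_all_shape_variations; infer_instance

-- ===== CLAIM (what is proved, stated in full; the proofs are below) =====
def Claim_equal_get_all_shape_variations : Prop := ∀ (shape : List (Int × Int)), Dom_get_all_shape_variations shape → Pre_get_all_shape_variations shape → Spec_get_all_shape_variations shape (get_all_shape_variations shape)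

-- ===== LEMMAS AND PROOFS =====

-- the normalizing translation of a list, as a plain map (proof-side canonical form)
def pvNrm (w : List (Int × Int)) : List (Int × Int) :=
  w.map (fun p => (p.1 - pvMinFst w, p.2 - pvMinSnd w))

lemma pv_inj_sub (a b : Int) : Function.Injective (fun p : Int × Int => (p.1 - a, p.2 - b)) := by
  intro p q h
  simp only [Prod.mk.injEq] at h
  exact Prod.ext (by omega) (by omega)

lemma pv_ofList_map {f : Int × Int → Int × Int} (hf : Function.Injective f)
    (xs : List (Int × Int)) :
    PySem.Set.ofList (xs.map f) = (PySem.Set.ofList xs).map f := by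
  induction xs using List.reverseRecOn with
  | nil => rfl
  | append_singleton xs x ih =>
      rw [List.map_append, List.map_singleton, PySem.Set.ofList_append_singleton,
        PySem.Set.ofList_append_singleton, ih]
      by_cases hx : x ∈ PySem.Set.ofList xs
      · have hfx : f x ∈ (PySem.Set.ofList xs).map f := List.mem_map_of_mem hx
        simp [PySem.Set.add, PySem.Set.contains, hx, hfx]
      · have hfx : f x ∉ (PySem.Set.ofList xs).map f := by
          intro h
          rcases List.mem_map.mp h with ⟨y, hy, hyx⟩
          exact hx (hf hyx ▸ hy)
        simp [PySem.Set.add, PySem.Set.contains, hx, hfx]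

lemma pv_normalize_nodup (w : List (Int × Int)) (hw : w.Nodup) :
    pvNormalize w = pvNrm w := by
  unfold pvNormalize pvNrm
  exact PySem.Set.ofList_eq_self_of_nodup _ (hw.map (pv_inj_sub _ _))

lemma pv_min?_eq_some_iff (l : List Int) (m : Int) :
    PySem.List.min? l (fun x => x) = some m ↔ m ∈ l ∧ ∀ y ∈ l, m ≤ y := by
  constructor
  · intro h; exact ⟨PySem.List.min?_mem h, PySem.List.min?_isMin h⟩
  · rintro ⟨hm, hmin⟩
    cases hl : PySem.List.min? l (fun x => x) with
    | none =>
        rw [PySem.List.min?_eq_none_iff] at hl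
        subst hl; simp at hm
    | some m' =>
        have h1 := PySem.List.min?_isMin hl m hm
        have h2 := hmin m' (PySem.List.min?_mem hl)
        exact congrArg some (le_antisymm h2 h1).symm

lemma pv_min?_congr_mem (l l' : List Int) (h : ∀ x, x ∈ l ↔ x ∈ l') :
    PySem.List.min? l (fun x => x) = PySem.List.min? l' (fun x => x) := by
  cases hl : PySem.List.min? l (fun x => x) with
  | none =>
      rw [PySem.List.min?_eq_none_iff] at hl
      subst hl
      cases hl' : PySem.List.min? l' (fun x => x) with
      | none => rfl
      | some m' =>
          have := PySem.List.min?_mem hl'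
          rw [← h] at this; simp at this
  | some m =>
      rw [pv_min?_eq_some_iff] at hl
      exact (pv_min?_eq_some_iff l' m |>.mpr ⟨(h m).mp hl.1, fun y hy => hl.2 y ((h y).mpr hy)⟩).symm

lemma pv_min?_map_shift (l : List Int) (a : Int) :
    PySem.List.min? (l.map (fun x => x + a)) (fun x => x)
      = (PySem.List.min? l (fun x => x)).map (fun x => x + a) := by
  cases hl : PySem.List.min? l (fun x => x) with
  | none =>
      rw [PySem.List.min?_eq_none_iff] at hl
      subst hl
      simp [PySem.List.min?_eq_none_iff]
  | some m =>
      rw [pv_min?_eq_some_iff] at hl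
      refine (pv_min?_eq_some_iff _ _).mpr ⟨List.mem_map_of_mem hl.1, ?_⟩
      intro y hy
      rcases List.mem_map.mp hy with ⟨x, hx, rfl⟩
      have := hl.2 x hx
      simpa using add_le_add_right this a

lemma pvMinFst_shift (w : List (Int × Int)) (hw : w ≠ []) (a b : Int) :
    pvMinFst (w.map (fun p => (p.1 + a, p.2 + b))) = pvMinFst w + a := by
  unfold pvMinFst
  have h1 : (w.map (fun p : Int × Int => (p.1 + a, p.2 + b))).map Prod.fst
      = (w.map Prod.fst).map (fun x => x + a) := by
    simp [List.map_map]
  rw [h1, pv_min?_map_shift]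
  cases hm : PySem.List.min? (w.map Prod.fst) (fun x => x) with
  | none => rw [PySem.List.min?_eq_none_iff] at hm; simp at hm; exact absurd hm hw
  | some m => rfl

lemma pvMinSnd_shift (w : List (Int × Int)) (hw : w ≠ []) (a b : Int) :
    pvMinSnd (w.map (fun p => (p.1 + a, p.2 + b))) = pvMinSnd w + b := by
  unfold pvMinSnd
  have h1 : (w.map (fun p : Int × Int => (p.1 + a, p.2 + b))).map Prod.snd
      = (w.map Prod.snd).map (fun x => x + b) := by
    simp [List.map_map]
  rw [h1, pv_min?_map_shift]
  cases hm : PySem.List.min? (w.map Prod.snd) (fun x => x) with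
  | none => rw [PySem.List.min?_eq_none_iff] at hm; simp at hm; exact absurd hm hw
  | some m => rfl

-- normalizing is invariant under a common translation
lemma pv_nrm_shift (w : List (Int × Int)) (hw : w ≠ []) (a b : Int) :
    pvNrm (w.map (fun p => (p.1 + a, p.2 + b))) = pvNrm w := by
  unfold pvNrm
  rw [pvMinFst_shift w hw a b, pvMinSnd_shift w hw a b, List.map_map]
  apply List.map_congr_left
  intro p _
  simp only [Function.comp_apply, Prod.mk.injEq]
  constructor <;> ring

lemma pv_ofList_ne_nil (s : List (Int × Int)) (hs : s ≠ []) : PySem.Set.ofList s ≠ [] := by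
  cases s with
  | nil => exact absurd rfl hs
  | cons x t =>
      intro h
      have : x ∈ PySem.Set.ofList (x :: t) := (PySem.Set.mem_ofList _ _).mpr (List.mem_cons_self)
      rw [h] at this; simp at this

lemma pv_map_ne_nil {f : Int × Int → Int × Int} {w : List (Int × Int)} (hw : w ≠ []) :
    w.map f ≠ [] := by
  cases w with
  | nil => exact absurd rfl hw
  | cons x t => simp

-- A rotate/flip/normalize step applied to the raw argument, in canonical form
lemma pv_step_raw {f : Int × Int → Int × Int} (hf : Function.Injective f)
    (s : List (Int × Int)) :
    pvNormalize (PySem.Set.ofList (s.map f)) = pvNrm ((PySem.Set.ofList s).map f) := by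
  rw [pv_ofList_map hf]
  exact pv_normalize_nodup _ ((PySem.Set.nodup_ofList s).map hf)

lemma pv_inj_r1 : Function.Injective (fun p : Int × Int => (-p.2, p.1)) := by
  intro p q h
  simp only [Prod.mk.injEq] at h
  exact Prod.ext (by omega) (by omega)

-- rotating a canonical shape = canonical form of the pointwise-rotated list
lemma pv_rotate_nrm (w : List (Int × Int)) (hw : w ≠ []) (hnd : w.Nodup) :
    pvRotate (pvNrm w) = pvNrm (w.map (fun p : Int × Int => (-p.2, p.1))) := by
  have hnrm_nd : (pvNrm w).Nodup := hnd.map (pv_inj_sub _ _)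
  have hmap_nd : ((pvNrm w).map (fun p : Int × Int => (-p.2, p.1))).Nodup := hnrm_nd.map pv_inj_r1
  unfold pvRotate
  rw [PySem.Set.ofList_eq_self_of_nodup _ hmap_nd,
    pv_normalize_nodup _ hmap_nd]
  have hcomp : (pvNrm w).map (fun p : Int × Int => (-p.2, p.1))
      = (w.map (fun p : Int × Int => (-p.2, p.1))).map
          (fun q : Int × Int => (q.1 + pvMinSnd w, q.2 + (-pvMinFst w))) := by
    unfold pvNrm
    rw [List.map_map, List.map_map]
    apply List.map_congr_left
    intro p _
    simp only [Function.comp_apply, Prod.mk.injEq]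
    constructor <;> ring
  rw [hcomp]
  exact pv_nrm_shift _ (pv_map_ne_nil hw) _ _

lemma pv_normalize_raw (s : List (Int × Int)) :
    pvNormalize s = (PySem.Set.ofList s).map
      (fun p => (p.1 - pvMinFst s, p.2 - pvMinSnd s)) := by
  unfold pvNormalize
  exact pv_ofList_map (pv_inj_sub _ _) s

lemma pvMinFst_ofList (s : List (Int × Int)) : pvMinFst (PySem.Set.ofList s) = pvMinFst s := by
  unfold pvMinFst
  apply congrArg (Option.getD · 0)
  apply pv_min?_congr_mem
  intro x
  constructor
  · intro hx
    rcases List.mem_map.mp hx with ⟨p, hp, rfl⟩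
    exact List.mem_map_of_mem ((PySem.Set.mem_ofList s p).mp hp)
  · intro hx
    rcases List.mem_map.mp hx with ⟨p, hp, rfl⟩
    exact List.mem_map_of_mem ((PySem.Set.mem_ofList s p).mpr hp)

lemma pvMinSnd_ofList (s : List (Int × Int)) : pvMinSnd (PySem.Set.ofList s) = pvMinSnd s := by
  unfold pvMinSnd
  apply congrArg (Option.getD · 0)
  apply pv_min?_congr_mem
  intro x
  constructor
  · intro hx
    rcases List.mem_map.mp hx with ⟨p, hp, rfl⟩
    exact List.mem_map_of_mem ((PySem.Set.mem_ofList s p).mp hp)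
  · intro hx
    rcases List.mem_map.mp hx with ⟨p, hp, rfl⟩
    exact List.mem_map_of_mem ((PySem.Set.mem_ofList s p).mpr hp)

-- normalize(s) on a raw argument = canonical form of set(s)
lemma pv_normalize_eq_nrm (s : List (Int × Int)) :
    pvNormalize s = pvNrm (PySem.Set.ofList s) := by
  rw [pv_normalize_raw]
  unfold pvNrm
  rw [pvMinFst_ofList, pvMinSnd_ofList]

-- the four candidates of one of A's blocks, in canonical form
lemma pv_cand1 (s : List (Int × Int)) :
    pvRotate s = pvNrm ((PySem.Set.ofList s).map (fun p : Int × Int => (-p.2, p.1))) :=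
  pv_step_raw pv_inj_r1 s

lemma pv_cand2 (s : List (Int × Int)) (hs : s ≠ []) :
    pvRotate (pvRotate s) = pvNrm ((PySem.Set.ofList s).map (fun p : Int × Int => (-p.1, -p.2))) := by
  rw [pv_cand1 s, pv_rotate_nrm _ (pv_map_ne_nil (pv_ofList_ne_nil s hs))
    ((PySem.Set.nodup_ofList s).map pv_inj_r1), List.map_map]
  rfl

lemma pv_cand3 (s : List (Int × Int)) (hs : s ≠ []) :
    pvRotate (pvRotate (pvRotate s))
      = pvNrm ((PySem.Set.ofList s).map (fun p : Int × Int => (p.2, -p.1))) := by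
  have hnd : ((PySem.Set.ofList s).map (fun p : Int × Int => (-p.1, -p.2))).Nodup := by
    refine (PySem.Set.nodup_ofList s).map ?_
    intro p q h
    simp only [Prod.mk.injEq] at h
    exact Prod.ext (by omega) (by omega)
  rw [pv_cand2 s hs, pv_rotate_nrm _ (pv_map_ne_nil (pv_ofList_ne_nil s hs)) hnd, List.map_map]
  apply congrArg pvNrm
  apply List.map_congr_left
  intro p _
  simp

lemma pv_cand4 (s : List (Int × Int)) (hs : s ≠ []) :
    pvRotate (pvRotate (pvRotate (pvRotate s))) = pvNormalize s := by
  have hnd : ((PySem.Set.ofList s).map (fun p : Int × Int => (p.2, -p.1))).Nodup := by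
    refine (PySem.Set.nodup_ofList s).map ?_
    intro p q h
    simp only [Prod.mk.injEq] at h
    exact Prod.ext (by omega) (by omega)
  rw [pv_cand3 s hs, pv_rotate_nrm _ (pv_map_ne_nil (pv_ofList_ne_nil s hs)) hnd, List.map_map,
    pv_normalize_eq_nrm]
  apply congrArg pvNrm
  have : ((fun p : Int × Int => (-p.2, p.1)) ∘ fun p : Int × Int => (p.2, -p.1))
      = (id : Int × Int → Int × Int) := by
    funext p; simp
  rw [this, List.map_id]

-- one of A's blocks is the dedup fold over its four cumulative-rotation candidates
lemma pv_spinBlock_eq (s : List (Int × Int)) (vs : List (List (Int × Int))) :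
    pvSpinBlock (s, vs) = (pvRotate (pvRotate (pvRotate (pvRotate s))),
      [pvRotate s, pvRotate (pvRotate s), pvRotate (pvRotate (pvRotate s)),
        pvRotate (pvRotate (pvRotate (pvRotate s)))].foldl
        (fun vars c => if pvContains vars c then vars else vars ++ [c]) vs) := by
  rfl

lemma pv_flipH_ne_nil (shape : List (Int × Int)) (hs : shape ≠ []) : pvFlipH shape ≠ [] := by
  unfold pvFlipH pvNormalize
  exact pv_ofList_ne_nil _ (pv_map_ne_nil (pv_ofList_ne_nil _ (pv_map_ne_nil hs)))

lemma pv_flipV_ne_nil (shape : List (Int × Int)) (hs : shape ≠ []) : pvFlipV shape ≠ [] := by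
  unfold pvFlipV pvNormalize
  exact pv_ofList_ne_nil _ (pv_map_ne_nil (pv_ofList_ne_nil _ (pv_map_ne_nil hs)))

-- the four candidates of an A block coincide with B's direct rotations of the same seed
lemma pv_block_cands (s : List (Int × Int)) (hs : s ≠ []) :
    [pvRotate s, pvRotate (pvRotate s), pvRotate (pvRotate (pvRotate s)),
      pvRotate (pvRotate (pvRotate (pvRotate s)))] = pvDirectRotations s := by
  unfold pvDirectRotations
  rw [pv_cand4 s hs, pv_cand3 s hs, pv_cand2 s hs, pv_cand1 s,
    pv_step_raw pv_inj_r1 s,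
    pv_step_raw (f := fun p : Int × Int => (-p.1, -p.2))
      (by intro p q h; simp only [Prod.mk.injEq] at h; exact Prod.ext (by omega) (by omega)) s,
    pv_step_raw (f := fun p : Int × Int => (p.2, -p.1))
      (by intro p q h; simp only [Prod.mk.injEq] at h; exact Prod.ext (by omega) (by omega)) s,
    pv_normalize_eq_nrm]

-- ===== VERDICT (by name: the statement is the Claim_ definition above) =====
theorem get_all_shape_variations_spec : Claim_equal_get_all_shape_variations := by
  intro shape _ hpre
  unfold Spec_get_all_shape_variations
  simp only [get_all_shape_variations, get_all_shape_variations_alt]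
  rw [pv_spinBlock_eq, pv_spinBlock_eq, pv_spinBlock_eq]
  simp only [← List.foldl_append]
  rw [pv_block_cands shape hpre, pv_block_cands _ (pv_flipH_ne_nil shape hpre),
    pv_block_cands _ (pv_flipV_ne_nil shape hpre)]
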